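-- pv_equiv track=rewrite | github.com/cash2one/fatty | prc_filter.py | _x86_missing
-- ===== SOURCE A (Python) =====
-- def _x86_missing(libs_arm, libs_x86, libs_3rd_party):
--     if len(libs_arm) == 0: return False
--     found_user_lib_in_x86 = False
--     c = 0
--     for lib in libs_arm:
--         if lib in libs_3rd_party:
--             c += 1
--             if lib not in libs_x86:
--                 return True
--         else: # user lib
--             if (not found_user_lib_in_x86) and lib in libs_x86:
--                 found_user_lib_in_x86 = True
--     if c == len(libs_arm):
--         return False # all arm libs are 3rd party libs
--     else:
--         return not found_user_lib_in_x86
-- ===== SOURCE B (Python) =====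
-- def _x86_missing(libs_arm, libs_x86, libs_3rd_party):
--     if len(libs_arm) == 0:
--         return False
--     x86 = set(libs_x86)
--     third_party = set(libs_3rd_party)
--     third = [l for l in libs_arm if l in third_party]
--     if any(l not in x86 for l in third):
--         return True
--     if len(third) == len(libs_arm):
--         return False
--     return not any(l in x86 for l in libs_arm if l not in third_party)
-- ===== Notes on version B (the rewrite author's own statement) =====
-- stated objective: simpler
-- what changed: Replaced A's single stateful scan (counter c, found flag, interleaved early return) with stateless passes over precomputed sets: filter the 3rd-party sublist once, then three direct any/length tests decide the result.
import Mathlib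
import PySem

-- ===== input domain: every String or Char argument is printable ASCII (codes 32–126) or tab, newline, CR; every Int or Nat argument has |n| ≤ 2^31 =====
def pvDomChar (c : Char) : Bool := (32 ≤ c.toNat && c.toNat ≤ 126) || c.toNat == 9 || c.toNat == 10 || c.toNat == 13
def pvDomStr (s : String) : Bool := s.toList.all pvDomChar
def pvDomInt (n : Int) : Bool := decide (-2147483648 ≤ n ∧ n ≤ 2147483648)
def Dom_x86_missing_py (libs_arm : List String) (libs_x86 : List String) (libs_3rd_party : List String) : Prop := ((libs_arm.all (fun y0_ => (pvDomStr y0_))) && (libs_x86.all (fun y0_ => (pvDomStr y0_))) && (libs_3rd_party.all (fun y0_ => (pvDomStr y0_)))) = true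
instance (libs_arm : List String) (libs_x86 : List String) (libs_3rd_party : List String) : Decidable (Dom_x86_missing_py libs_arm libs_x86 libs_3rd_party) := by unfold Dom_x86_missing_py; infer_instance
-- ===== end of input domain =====

-- B replaces A's single stateful scan (counter + flag + early return) with stateless filter/any passes; objective: simpler.


-- ===== PORT A =====
-- The for-loop with early return, counter c and flag found_user_lib_in_x86;
-- after the loop: `if c == len(libs_arm): return False else: return not found`.
def x86LoopA (libs_x86 libs_3rd_party : List String) (n : Int) :
    List String → Bool → Int → Bool
  | [], found, c => if c = n then false else !found
  | lib :: rest, found, c =>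
      if libs_3rd_party.contains lib then
        -- c += 1; if lib not in libs_x86: return True
        if !(libs_x86.contains lib) then true
        else x86LoopA libs_x86 libs_3rd_party n rest found (c + 1)
      else
        x86LoopA libs_x86 libs_3rd_party n rest
          (if !found && libs_x86.contains lib then true else found) c

def x86_missing_py (libs_arm : List String) (libs_x86 : List String) (libs_3rd_party : List String) : Bool :=
  if libs_arm.length = 0 then false
  else x86LoopA libs_x86 libs_3rd_party (libs_arm.length : Int) libs_arm false 0

-- ===== PORT B =====
def x86_missing_py_alt (libs_arm : List String) (libs_x86 : List String) (libs_3rd_party : List String) : Bool :=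
  if libs_arm.length = 0 then false
  else
    let x86 : PySem.Set String := PySem.Set.ofList libs_x86
    let third_party : PySem.Set String := PySem.Set.ofList libs_3rd_party
    let third := libs_arm.filter (fun l => PySem.Set.contains third_party l)
    if third.any (fun l => !(PySem.Set.contains x86 l)) then true
    else if third.length = libs_arm.length then false
    else !((libs_arm.filter (fun l => !(PySem.Set.contains third_party l))).any
            (fun l => PySem.Set.contains x86 l))

-- ===== PRECONDITION & SPEC =====
def Spec_x86_missing_py (libs_arm : List String) (libs_x86 : List String) (libs_3rd_party : List String) (out : Bool) : Prop := out = x86_missing_py_alt libs_arm libs_x86 libs_3rd_party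
instance (libs_arm : List String) (libs_x86 : List String) (libs_3rd_party : List String) (out : Bool) : Decidable (Spec_x86_missing_py libs_arm libs_x86 libs_3rd_party out) := by unfold Spec_x86_missing_py; infer_instance

-- ===== CLAIM (what is proved, stated in full; the proofs are below) =====
def Claim_equal_x86_missing_py : Prop := ∀ (libs_arm : List String) (libs_x86 : List String) (libs_3rd_party : List String), Dom_x86_missing_py libs_arm libs_x86 libs_3rd_party → Spec_x86_missing_py libs_arm libs_x86 libs_3rd_party (x86_missing_py libs_arm libs_x86 libs_3rd_party)

-- ===== LEMMAS AND PROOFS =====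

-- Characterisation of A's loop: for any suffix `rest` and carried state (found, c),
-- the loop returns true iff some 3rd-party lib in `rest` is missing from x86;
-- otherwise it reaches the end with c increased by the number of 3rd-party libs in
-- `rest` and found or-ed with "some user lib of rest is in x86".
theorem x86LoopA_eq (x86 t3 : List String) (n : Int) :
    ∀ (rest : List String) (found : Bool) (c : Int),
      x86LoopA x86 t3 n rest found c =
        if rest.any (fun l => t3.contains l && !(x86.contains l)) then true
        else if c + ((rest.filter (fun l => t3.contains l)).length : Int) = n then false
        else !(found || rest.any (fun l => !(t3.contains l) && x86.contains l)) := by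
  intro rest
  induction rest with
  | nil => intro found c; simp [x86LoopA]
  | cons lib rest ih =>
    intro found c
    by_cases h3 : lib ∈ t3
    · by_cases hx : lib ∈ x86
      · simp only [x86LoopA, List.contains_eq_mem, h3, hx, decide_true, Bool.not_true,
          Bool.false_eq_true, if_false, ih, List.any_cons, List.filter_cons]
        simp
        have hc : c + 1 + ((List.filter (fun l => decide (l ∈ t3)) rest).length : Int)
            = c + (((List.filter (fun l => decide (l ∈ t3)) rest).length : Int) + 1) := by ring
        rw [hc]
      · simp [x86LoopA, h3, hx]
    · by_cases hx : lib ∈ x86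
      · simp only [x86LoopA, List.contains_eq_mem, h3, decide_false, Bool.false_eq_true,
          if_false, ih, List.any_cons, List.filter_cons]
        cases found <;> simp [hx]
      · simp only [x86LoopA, List.contains_eq_mem, h3, decide_false, Bool.false_eq_true,
          if_false, ih, List.any_cons, List.filter_cons]
        cases found <;> simp [hx]

-- ===== VERDICT (by name: the statement is the Claim_ definition above) =====
theorem x86_missing_py_spec : Claim_equal_x86_missing_py := by
  intro arm x86 t3 _
  unfold Spec_x86_missing_py x86_missing_py x86_missing_py_alt
  by_cases hnil : arm.length = 0
  · simp [hnil]
  · simp only [hnil, if_false]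
    rw [x86LoopA_eq]
    simp only [List.any_filter, zero_add]
    by_cases hmiss : arm.any (fun l => t3.contains l && !(x86.contains l))
    · simp
    · simp only [hmiss, Bool.false_eq_true, if_false]
      simp only [List.any_eq_true, List.contains_eq_mem, Bool.and_eq_true, Bool.not_eq_true', decide_eq_true_eq, decide_eq_false_iff_not, not_exists, not_and] at hmiss
      by_cases hlen : (arm.filter (fun l => t3.contains l)).length = arm.length
      · simp
        intro x hx h3 h86
        exact absurd h86 (hmiss x hx h3)
      · have hne : ¬ (((arm.filter (fun l => t3.contains l)).length : Int) = (arm.length : Int)) := by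
          exact_mod_cast hlen
        simp only [hne, if_false]
        have hnomiss : ¬ ∃ x ∈ arm, x ∈ t3 ∧ x ∉ x86 := by
          rintro ⟨x, hx, h3, h86⟩
          exact hmiss x hx h3 h86
        have hall : ¬ (∀ a ∈ arm, a ∈ t3) := by
          intro h
          exact hlen (by rw [List.length_filter_eq_length_iff]; intro a ha; simpa using h a ha)
        simp [hnomiss, hall]
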